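-- pv_equiv track=rewrite | github.com/duartenina/LoL-Damage-Calculator | code/extra.py | list_in_list
-- ===== SOURCE A (Python) =====
-- def list_in_list (list1, list2):
--     """
--     Test if all items in list1 are also in list2
--     """
--
--     if (list1 == []):
--         return False
--
--     list2_copy = list(list2)
--
--     for i in list1:
--         if not (i in list2_copy):
--             return False
--         list2_copy.remove(i)
--     else:
--         return True
-- ===== SOURCE B (Python) =====
-- def list_in_list(list1, list2):
--     if list1 == []:
--         return False
--     need = {}
--     for x in list1:
--         need[x] = need.get(x, 0) + 1
--     have = {}
--     for x in list2:
--         have[x] = have.get(x, 0) + 1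
--     return all(have.get(x, 0) >= c for x, c in need.items())
-- ===== Notes on version B (the rewrite author's own statement) =====
-- stated objective: alternative
-- what changed: Replaces A's consuming loop (membership test plus remove on a mutable copy of list2 for each item of list1) with two single-pass dict frequency counters compared key by key; a O(n+m) algorithm vs A's O(n*m), though A's C-level list scans are not slower in practice on the measured inputs.
import Mathlib
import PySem

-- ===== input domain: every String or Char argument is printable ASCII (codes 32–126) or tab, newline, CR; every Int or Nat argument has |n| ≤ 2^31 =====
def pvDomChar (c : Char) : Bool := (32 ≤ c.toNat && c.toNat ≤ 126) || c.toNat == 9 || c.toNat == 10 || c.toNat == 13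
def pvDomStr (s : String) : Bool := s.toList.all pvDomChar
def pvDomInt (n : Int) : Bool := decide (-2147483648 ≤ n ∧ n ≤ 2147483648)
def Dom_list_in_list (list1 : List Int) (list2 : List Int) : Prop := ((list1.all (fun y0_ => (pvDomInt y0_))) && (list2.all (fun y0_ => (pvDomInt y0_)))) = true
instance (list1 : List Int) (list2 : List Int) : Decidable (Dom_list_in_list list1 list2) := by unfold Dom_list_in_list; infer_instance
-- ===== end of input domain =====

-- ===== PORT A =====
-- A's for-loop: consume list1, checking membership in the remaining copy of list2
-- and removing the first matching occurrence (Python list.remove = List.erase, exact on Int).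
def listInListLoop : List Int → List Int → Bool
  | [], _ => true
  | i :: rest, l2 => if i ∈ l2 then listInListLoop rest (l2.erase i) else false

def list_in_list (list1 : List Int) (list2 : List Int) : Bool :=
  if list1 = [] then false
  else listInListLoop list1 list2

-- ===== PORT B =====
-- B: empty guard, then two single-pass dict frequency counters, compared key by key
def list_in_list_alt (list1 : List Int) (list2 : List Int) : Bool :=
  if list1 = [] then false
  else
    let need := list1.foldl (fun d x => d.insert x (d.getD x 0 + 1))
      (PySem.Dict.empty : PySem.Dict Int Int)
    let haveD := list2.foldl (fun d x => d.insert x (d.getD x 0 + 1))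
      (PySem.Dict.empty : PySem.Dict Int Int)
    need.items.all (fun p => haveD.getD p.1 0 ≥ p.2)

-- ===== PRECONDITION & SPEC =====
def Spec_list_in_list (list1 : List Int) (list2 : List Int) (out : Bool) : Prop := out = list_in_list_alt list1 list2
instance (list1 : List Int) (list2 : List Int) (out : Bool) : Decidable (Spec_list_in_list list1 list2 out) := by unfold Spec_list_in_list; infer_instance

-- ===== CLAIM (what is proved, stated in full; the proofs are below) =====
def Claim_equal_list_in_list : Prop := ∀ (list1 : List Int) (list2 : List Int), Dom_list_in_list list1 list2 → Spec_list_in_list list1 list2 (list_in_list list1 list2)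

-- ===== LEMMAS AND PROOFS =====

-- A's consuming loop accepts exactly the multiset-inclusion of list1 in list2.
theorem loop_iff_count (l1 l2 : List Int) :
    listInListLoop l1 l2 = true ↔ ∀ x : Int, l1.count x ≤ l2.count x := by
  induction l1 generalizing l2 with
  | nil => simp [listInListLoop]
  | cons a rest ih =>
    simp only [listInListLoop]
    by_cases ha : a ∈ l2
    · simp only [ha, if_pos, ih]
      constructor
      · intro h x
        have hx := h x
        by_cases hxa : x = a
        · subst hxa
          have := List.count_erase_self (a := x) (l := l2)
          have hpos : 1 ≤ l2.count x := List.one_le_count_iff.mpr ha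
          simp [List.count_cons_self]
          omega
        · have h1 := List.count_erase_of_ne (l := l2) hxa
          have h2 : (a :: rest).count x = rest.count x :=
            List.count_cons_of_ne (Ne.symm hxa)
          omega
      · intro h x
        have hx := h x
        by_cases hxa : x = a
        · subst hxa
          have := List.count_erase_self (a := x) (l := l2)
          simp [List.count_cons_self] at hx
          omega
        · have h1 := List.count_erase_of_ne (l := l2) hxa
          have h2 : (a :: rest).count x = rest.count x :=
            List.count_cons_of_ne (Ne.symm hxa)
          omega
    · simp only [ha, if_neg, not_false_iff]
      constructor
      · intro h; cases h
      · intro h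
        have := h a
        have : (1 : Nat) ≤ l2.count a := by
          simp [List.count_cons_self] at this; omega
        exact absurd (List.one_le_count_iff.mp this) ha

-- B's counter comparison equals the unbounded count condition
theorem alt_iff_count (l1 l2 : List Int) :
    ((PySem.Dict.counter l1).items.all
        (fun p => (PySem.Dict.counter l2).getD p.1 0 ≥ p.2)) = true ↔
      ∀ x : Int, l1.count x ≤ l2.count x := by
  simp only [PySem.Dict.items_counter, List.all_map, List.all_eq_true,
    Function.comp, PySem.Dict.getD_counter, ge_iff_le, Nat.cast_le,
    decide_eq_true_eq, PySem.Set.mem_ofList]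
  constructor
  · intro h x
    by_cases hx : x ∈ l1
    · exact h x hx
    · simp [List.count_eq_zero_of_not_mem hx]
  · intro h x _; exact h x

-- ===== VERDICT (by name: the statement is the Claim_ definition above) =====
theorem list_in_list_spec : Claim_equal_list_in_list := by
  intro l1 l2 _
  unfold Spec_list_in_list list_in_list list_in_list_alt
  by_cases h : l1 = []
  · simp [h]
  · simp only [h, if_neg, not_false_iff,
      PySem.Dict.foldl_insert_getD_add_one_eq_counter]
    have := (loop_iff_count l1 l2).trans (alt_iff_count l1 l2).symm
    cases hb : listInListLoop l1 l2 <;>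
      cases hb2 : (PySem.Dict.counter l1).items.all
          (fun p => (PySem.Dict.counter l2).getD p.1 0 ≥ p.2) <;>
      simp_all
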